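-- pv_equiv track=rewrite | github.com/lixxlim/algorithm-practice | python/250526_S5_11256.py | solution
-- ===== SOURCE A (Python) =====
-- def solution(J, N, NS):
--     cnt = 0
--     for i in range(N):
--         J -= NS[i]
--         cnt += 1
--         if J <= 0 :
--             break
--     return cnt
-- ===== SOURCE B (Python) =====
-- def solution(J, N, NS):
--     n = max(N, 0)
--     prefix = []
--     acc = 0
--     for x in NS[:n]:
--         acc += x
--         prefix.append(acc)
--     return next((i for i, s in enumerate(prefix, 1) if s >= J), len(prefix))
-- ===== Notes on version B (the rewrite author's own statement) =====
-- stated objective: alternative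
-- what changed: B builds the table of prefix sums of the first N elements in one pass and then searches it for the first 1-based position whose prefix sum reaches J (defaulting to the table length), instead of A's inline subtract-and-test loop; Pre_ excludes exactly the inputs where A raises IndexError (N > len(NS) with no prefix sum reaching J), where B instead returns len(NS).
import Mathlib
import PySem

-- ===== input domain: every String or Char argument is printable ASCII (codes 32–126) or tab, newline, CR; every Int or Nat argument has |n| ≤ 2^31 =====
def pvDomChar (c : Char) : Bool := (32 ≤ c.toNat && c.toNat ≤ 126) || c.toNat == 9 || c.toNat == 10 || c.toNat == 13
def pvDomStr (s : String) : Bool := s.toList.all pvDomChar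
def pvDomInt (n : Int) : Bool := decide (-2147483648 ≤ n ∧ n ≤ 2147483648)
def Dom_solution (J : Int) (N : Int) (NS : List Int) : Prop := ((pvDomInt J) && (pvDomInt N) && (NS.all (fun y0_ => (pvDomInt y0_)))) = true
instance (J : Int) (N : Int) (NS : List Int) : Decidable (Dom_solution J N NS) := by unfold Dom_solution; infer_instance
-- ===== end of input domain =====

-- B builds the prefix-sum table of the first N elements, then searches it for the first
-- position reaching J (alternative decomposition); Pre_ excludes exactly the inputs on
-- which A raises IndexError.


-- ===== PORT A =====
-- the for-loop of A: index i runs up to n = N.toNat; NS[i] via pyGet? (none = IndexError,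
-- excluded by Pre_solution; the port returns cnt there, a value never claimed about)
def solutionLoopA (J cnt : Int) (NS : List Int) (i n : Nat) : Int :=
  if h : i < n then
    match PySem.List.pyGet? NS (i : Int) with
    | none => cnt  -- Python raises IndexError here; outside Pre_solution
    | some x =>
      if J - x ≤ 0 then cnt + 1
      else solutionLoopA (J - x) (cnt + 1) NS (i + 1) n
  else cnt
termination_by n - i
decreasing_by omega

def solution (J : Int) (N : Int) (NS : List Int) : Int :=
  solutionLoopA J 0 NS 0 N.toNat

-- ===== PORT B =====
-- one pass building the prefix sums of NS[:max(N,0)]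
def prefixAccum (acc : Int) : List Int → List Int
  | [] => []
  | x :: xs => (acc + x) :: prefixAccum (acc + x) xs

-- the generator: first 1-based index i with prefix[i] >= J
def findGeFrom (J : Int) (i : Int) : List Int → Option Int
  | [] => none
  | s :: ss => if J ≤ s then some i else findGeFrom J (i + 1) ss

def solution_alt (J : Int) (N : Int) (NS : List Int) : Int :=
  let pref := prefixAccum 0 (NS.take (max N 0).toNat)  -- NS[:n], n = max(N,0) ≥ 0
  (findGeFrom J 1 pref).getD (pref.length : Int)

-- ===== PRECONDITION & SPEC =====
-- Pre_ excludes exactly the inputs where A raises IndexError: N exceeds len(NS) and no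
-- prefix sum of NS ever reaches J, so the loop runs off the end of NS.
def Pre_solution (J : Int) (N : Int) (NS : List Int) : Prop :=
  N.toNat ≤ NS.length ∨ ∃ j < NS.length, J ≤ (NS.take (j + 1)).sum
instance (J : Int) (N : Int) (NS : List Int) : Decidable (Pre_solution J N NS) := by
  unfold Pre_solution; infer_instance

def pvWitness_solution : Int × Int × List Int := (3, 2, [2, 2])

def Spec_solution (J : Int) (N : Int) (NS : List Int) (out : Int) : Prop := out = solution_alt J N NS
instance (J : Int) (N : Int) (NS : List Int) (out : Int) : Decidable (Spec_solution J N NS out) := by unfold Spec_solution; infer_instance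

-- ===== CLAIM (what is proved, stated in full; the proofs are below) =====
def Claim_equal_solution : Prop := ∀ (J : Int) (N : Int) (NS : List Int), Dom_solution J N NS → Pre_solution J N NS → Spec_solution J N NS (solution J N NS)
-- ===== LEMMAS AND PROOFS =====

-- reference recursion: number of items consumed until the running total reaches J
def countUntil (J : Int) : List Int → Int
  | [] => 0
  | x :: xs => if J - x ≤ 0 then 1 else 1 + countUntil (J - x) xs

lemma prefixAccum_length (l : List Int) : ∀ (a : Int), (prefixAccum a l).length = l.length := by
  induction l with
  | nil => intro a; simp [prefixAccum]
  | cons y ys ih => intro a; simp [prefixAccum, ih]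

lemma findGeFrom_prefixAccum (l : List Int) : ∀ (J acc i : Int),
    (findGeFrom J i (prefixAccum acc l)).getD (i - 1 + l.length) = i - 1 + countUntil (J - acc) l := by
  induction l with
  | nil => intro J acc i; simp [prefixAccum, findGeFrom, countUntil]
  | cons x xs ih =>
    intro J acc i
    simp only [prefixAccum, findGeFrom, countUntil]
    by_cases h : J ≤ acc + x
    · simp [h, show J - acc - x ≤ 0 by omega]
    · simp only [h, if_false, show ¬ (J - acc - x ≤ 0) by omega]
      have hh := ih J (acc + x) (i + 1)
      rw [show J - (acc + x) = J - acc - x by ring] at hh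
      rcases hr : findGeFrom J (i + 1) (prefixAccum (acc + x) xs) with _ | r
      · rw [hr, Option.getD_none] at hh
        simp only [Option.getD_none, List.length_cons]
        push_cast
        omega
      · rw [hr, Option.getD_some] at hh
        simp only [Option.getD_some]
        omega

lemma solution_alt_eq_countUntil (J N : Int) (NS : List Int) :
    solution_alt J N NS = countUntil J (NS.take N.toNat) := by
  have hmax : (max N 0).toNat = N.toNat := by
    rcases le_or_gt 0 N with h | h
    · simp [max_eq_left h]
    · simp [max_eq_right (le_of_lt h), Int.toNat_of_nonpos (le_of_lt h)]
  unfold solution_alt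
  rw [hmax]
  have key := findGeFrom_prefixAccum (NS.take N.toNat) J 0 1
  simp only [sub_zero] at key
  rcases hfg : findGeFrom J 1 (prefixAccum 0 (NS.take N.toNat)) with _ | r
  · rw [hfg, Option.getD_none] at key
    simp only [hfg, Option.getD_none, prefixAccum_length]
    omega
  · rw [hfg, Option.getD_some] at key
    simp only [hfg, Option.getD_some]
    omega

lemma solutionLoopA_eq (m : Nat) : ∀ (i n : Nat) (J cnt : Int) (NS : List Int),
    m = n - i →
    (n ≤ NS.length ∨ ∃ j, i ≤ j ∧ j < NS.length ∧ J ≤ ((NS.drop i).take (j + 1 - i)).sum) →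
    solutionLoopA J cnt NS i n = cnt + countUntil J ((NS.drop i).take (n - i)) := by
  induction m with
  | zero =>
    intro i n J cnt NS hm _
    have hin : ¬ i < n := by omega
    rw [solutionLoopA, dif_neg hin]
    have : n - i = 0 := by omega
    simp [this, countUntil]
  | succ m ih =>
    intro i n J cnt NS hm hgood
    have hin : i < n := by clear hgood; omega
    have hm' : m = n - (i + 1) := by clear hgood; omega
    have hilen : i < NS.length := by
      rcases hgood with h | ⟨j, hij, hj, _⟩
      · omega
      · omega
    rw [solutionLoopA, dif_pos hin]
    have hget : PySem.List.pyGet? NS (i : Int) = some NS[i] := by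
      rw [show ((i : Int)) = ((i : Nat) : Int) from rfl, PySem.List.pyGet?_natCast]
      simp [hilen]
    rw [hget]
    have hdrop : NS.drop i = NS[i] :: NS.drop (i + 1) := by
      rw [List.drop_eq_getElem_cons hilen]
    have htake : (NS.drop i).take (n - i) = NS[i] :: ((NS.drop (i + 1)).take (n - (i + 1))) := by
      rw [hdrop]
      have : n - i = (n - (i + 1)) + 1 := by omega
      rw [this, List.take_succ_cons]
    by_cases hbr : J - NS[i] ≤ 0
    · simp [hbr, htake, countUntil]
    · simp only [hbr, if_false]
      have hgood' : n ≤ NS.length ∨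
          ∃ j, i + 1 ≤ j ∧ j < NS.length ∧
            J - NS[i] ≤ ((NS.drop (i + 1)).take (j + 1 - (i + 1))).sum := by
        rcases hgood with h | ⟨j, hij, hj, hsum⟩
        · exact Or.inl h
        · right
          have hji : i + 1 ≤ j := by
            by_contra hc
            have hji' : j = i := by omega
            rw [hji'] at hsum
            have : (NS.drop i).take (i + 1 - i) = [NS[i]] := by
              rw [show i + 1 - i = 1 by omega, hdrop]
              rfl
            rw [this] at hsum
            simp at hsum
            omega
          refine ⟨j, hji, hj, ?_⟩
          have hs : ((NS.drop i).take (j + 1 - i)).sum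
              = NS[i] + ((NS.drop (i + 1)).take (j + 1 - (i + 1))).sum := by
            rw [hdrop, show j + 1 - i = (j + 1 - (i + 1)) + 1 by omega, List.take_succ_cons]
            simp
          rw [hs] at hsum
          omega
      rw [ih (i + 1) n (J - NS[i]) (cnt + 1) NS hm' hgood', htake]
      simp only [countUntil, hbr, if_false]
      ring

-- ===== VERDICT (by name: the statement is the Claim_ definition above) =====
theorem solution_spec : Claim_equal_solution := by
  intro J N NS _ hpre
  unfold Spec_solution
  rw [solution_alt_eq_countUntil]
  unfold solution
  rw [solutionLoopA_eq (N.toNat - 0) 0 N.toNat J 0 NS rfl]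
  · simp
  · rcases hpre with h | ⟨j, hj, hsum⟩
    · left; exact h
    · right; exact ⟨j, Nat.zero_le _, hj, by simpa using hsum⟩
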